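-- pv_equiv track=rewrite | github.com/DevParapalli/RTMNU-SEM-7 | solved_questions/test2.py | minPartitions
-- ===== SOURCE A (Python) =====
-- def minPartitions(used, totalCapacity):
--     total_used = sum(used)
--     num_partitions = 0;
--
--     for cap in sorted(totalCapacity, reverse=True):
--         if total_used > 0:
--             num_partitions += 1
--             total_used -= cap
--
--     return num_partitions
-- ===== SOURCE B (Python) =====
-- def minPartitions(used, totalCapacity):
--     total_used = sum(used)
--     if total_used <= 0:
--         return 0
--     # Complement view: instead of greedily taking the largest capacities until the
--     # usage is covered, sort ASCENDING and find the most small capacities that can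
--     # be left unused (their sum must fit in the slack = total capacity - usage);
--     # the answer is everything that could not be dropped.
--     caps = sorted(totalCapacity)
--     slack = sum(caps) - total_used
--     dropped = 0
--     q = 0
--     d = 0
--     for c in caps:
--         q += c
--         d += 1
--         if q <= slack:
--             dropped = d
--     return len(caps) - dropped
-- ===== Notes on version B (the rewrite author's own statement) =====
-- stated objective: alternative
-- what changed: B solves the complementary problem: instead of greedily subtracting the largest capacities until the usage is covered, it sorts ascending and finds the most smallest capacities whose sum fits in the slack (total capacity minus usage), returning the count of the remaining ones.
import Mathlib
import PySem

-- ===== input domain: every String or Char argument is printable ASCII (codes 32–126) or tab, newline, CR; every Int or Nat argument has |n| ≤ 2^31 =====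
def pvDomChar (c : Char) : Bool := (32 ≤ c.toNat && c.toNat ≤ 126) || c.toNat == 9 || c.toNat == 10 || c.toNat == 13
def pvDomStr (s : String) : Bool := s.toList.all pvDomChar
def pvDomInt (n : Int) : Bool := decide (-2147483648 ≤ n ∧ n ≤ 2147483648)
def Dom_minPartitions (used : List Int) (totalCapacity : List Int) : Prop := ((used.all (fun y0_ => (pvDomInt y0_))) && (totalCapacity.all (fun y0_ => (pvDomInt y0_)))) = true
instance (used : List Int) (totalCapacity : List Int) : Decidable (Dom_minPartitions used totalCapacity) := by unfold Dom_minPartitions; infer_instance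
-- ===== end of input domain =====

-- B solves the complementary problem (alternative decomposition, same cost): sort
-- ascending and drop as many smallest capacities as fit in the slack S - total_used;
-- the answer is the count of the remaining capacities.

-- ===== PORT A =====
def minPartitions (used : List Int) (totalCapacity : List Int) : Int :=
  let totalUsed := used.foldl (· + ·) 0
  let st := (PySem.List.sorted totalCapacity (fun x => x) true).foldl
      (fun (s : Int × Int) cap => if s.1 > 0 then (s.1 - cap, s.2 + 1) else s)
      (totalUsed, 0)
  st.2

-- ===== PORT B =====
def minPartitions_alt (used : List Int) (totalCapacity : List Int) : Int :=
  let totalUsed := used.foldl (· + ·) 0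
  if totalUsed ≤ 0 then 0
  else
    let caps := PySem.List.sorted totalCapacity (fun x => x) false
    let slack := caps.foldl (· + ·) 0 - totalUsed
    let st := caps.foldl
        (fun (st : Int × Int × Int) c =>
          let q := st.2.1 + c
          let d := st.2.2 + 1
          (if q ≤ slack then d else st.1, q, d))
        (0, 0, 0)
    (caps.length : Int) - st.1

-- ===== PRECONDITION & SPEC =====
def Spec_minPartitions (used : List Int) (totalCapacity : List Int) (out : Int) : Prop := out = minPartitions_alt used totalCapacity
instance (used : List Int) (totalCapacity : List Int) (out : Int) : Decidable (Spec_minPartitions used totalCapacity out) := by unfold Spec_minPartitions; infer_instance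

-- ===== CLAIM =====
def Claim_equal_minPartitions : Prop := ∀ (used : List Int) (totalCapacity : List Int), Dom_minPartitions used totalCapacity → Spec_minPartitions used totalCapacity (minPartitions used totalCapacity)

-- ===== LEMMAS AND PROOFS =====

-- A's loop as structural recursion on the (descending) capacity list
def pvG (t : Int) : List Int → Int
  | [] => 0
  | c :: r => if t > 0 then 1 + pvG (t - c) r else 0

-- B's loop body, named
def pvStep (slack : Int) (st : Int × Int × Int) (c : Int) : Int × Int × Int :=
  let q := st.2.1 + c
  let d := st.2.2 + 1
  (if q ≤ slack then d else st.1, q, d)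

theorem pvFoldA_eq_g (L : List Int) (t n : Int) :
    (L.foldl (fun (s : Int × Int) cap => if s.1 > 0 then (s.1 - cap, s.2 + 1) else s) (t, n)).2
      = n + pvG t L := by
  induction L generalizing t n with
  | nil => simp [pvG]
  | cons c r ih =>
    simp only [List.foldl, pvG]
    by_cases h : t > 0
    · rw [if_pos h, if_pos h, ih]; ring
    · rw [if_neg h, if_neg h, ih]
      cases r with
      | nil => simp [pvG]
      | cons c' r' => simp [pvG, if_neg h]

-- the q- and d-components of B's fold are the running sum and the running count
theorem pvStep_snd (slack : Int) (xs : List Int) (dr q d : Int) :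
    (xs.foldl (pvStep slack) (dr, q, d)).2 = (q + xs.sum, d + xs.length) := by
  induction xs generalizing dr q d with
  | nil => simp
  | cons c r ih =>
    simp only [List.foldl, pvStep, ih, List.sum_cons, List.length_cons, Prod.mk.injEq]
    exact ⟨by ring, by push_cast; ring⟩

-- if the whole remaining sum fits in the slack, the last iteration fires: dropped = full count
theorem pvStep_full (slack : Int) (xs : List Int) (dr q d : Int)
    (hne : xs ≠ []) (h : q + xs.sum ≤ slack) :
    (xs.foldl (pvStep slack) (dr, q, d)).1 = d + xs.length := by
  induction xs generalizing dr q d with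
  | nil => exact absurd rfl hne
  | cons c r ih =>
    simp only [List.foldl, pvStep]
    cases r with
    | nil =>
      simp only [List.foldl]
      rw [if_pos (by simp at h; omega)]
      simp
    | cons c' r' =>
      rw [ih _ _ _ (by simp) (by simp at h ⊢; omega)]
      simp; ring

-- the core correspondence: A's greedy count over a list L equals the length of L minus
-- B's dropped count computed over L.reverse, with slack = sum L - t, whenever t > 0
theorem pvMain (L : List Int) (t : Int) (ht : t > 0) :
    pvG t L = (L.length : Int) - (L.reverse.foldl (pvStep (L.sum - t)) (0, 0, 0)).1 := by
  induction L generalizing t with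
  | nil => simp [pvG]
  | cons c r ih =>
    have hrev : (c :: r).reverse = r.reverse ++ [c] := by simp
    rw [hrev, List.foldl_append]
    -- the appended last step (q = total sum) never fires since t > 0
    have hst : (r.reverse.foldl (pvStep ((c :: r).sum - t)) (0, 0, 0)).2
        = (r.sum, (r.length : Int)) := by
      rw [pvStep_snd]; simp
    set st := r.reverse.foldl (pvStep ((c :: r).sum - t)) (0, 0, 0) with hstdef
    have hq : st.2.1 = r.sum := by rw [hst]
    have hlast : ([c].foldl (pvStep ((c :: r).sum - t)) st).1 = st.1 := by
      simp only [List.foldl, pvStep]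
      rw [hq, if_neg (by simp [List.sum_cons]; omega)]
    rw [hlast]
    simp only [pvG, if_pos ht]
    by_cases hc : t - c > 0
    · -- recurse: same slack, target t - c over r
      have := ih (t - c) hc
      have hsl : (c :: r).sum - t = r.sum - (t - c) := by simp [List.sum_cons]; ring
      rw [hsl] at hstdef
      rw [this, hstdef]
      simp [List.length_cons]; ring
    · -- t - c ≤ 0 : A stops after this element; B's dropped = r.length
      have hg : pvG (t - c) r = 0 := by
        cases r with
        | nil => simp [pvG]
        | cons x xs => simp only [pvG]; rw [if_neg hc]
      rw [hg]
      cases hr : r with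
      | nil => subst hr; simp [hstdef]
      | cons x xs =>
        have hdr : st.1 = (r.length : Int) := by
          rw [hstdef, pvStep_full]
          · simp
          · subst hr; simp
          · simp [List.sum_cons] at *; omega
        rw [hdr, hr]; simp only [List.length_cons]; push_cast [List.length_cons]; ring

-- sorting descending is the reverse of sorting ascending (identity key on Int)
theorem pvSortedRev (xs : List Int) :
    PySem.List.sorted xs (fun x => x) true = (PySem.List.sorted xs (fun x => x) false).reverse := by
  refine List.Perm.eq_of_pairwise (fun a _ b _ h1 h2 => by omega)
    (PySem.List.sorted_pairwise_rev xs (fun x => x)) ?_ ?_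
  · rw [List.pairwise_reverse]
    exact PySem.List.sorted_pairwise xs (fun x => x)
  · exact (PySem.List.sorted_perm xs (fun x => x) true).trans
      ((PySem.List.sorted_perm xs (fun x => x) false).symm.trans
        (List.reverse_perm _).symm)

theorem pvFoldlAdd (xs : List Int) (a : Int) : xs.foldl (· + ·) a = a + xs.sum := by
  induction xs generalizing a with
  | nil => simp
  | cons c r ih => simp [List.foldl, ih]; ring

-- ===== VERDICT =====
theorem minPartitions_spec : Claim_equal_minPartitions := by
  intro used totalCapacity _
  unfold Spec_minPartitions minPartitions minPartitions_alt
  simp only []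
  set T := used.foldl (· + ·) 0 with hT
  by_cases h : T ≤ 0
  · rw [if_pos h, pvFoldA_eq_g]
    cases hs : PySem.List.sorted totalCapacity (fun x => x) true with
    | nil => simp [pvG]
    | cons c r => simp [pvG, if_neg (by omega : ¬ T > 0)]
  · rw [if_neg h, pvFoldA_eq_g, pvSortedRev]
    set s := PySem.List.sorted totalCapacity (fun x => x) false with hs
    have := pvMain s.reverse T (by omega)
    rw [List.reverse_reverse, List.length_reverse, List.sum_reverse] at this
    rw [this, pvFoldlAdd]
    simp only [Int.zero_add]
    rfl
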